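-- pv_equiv track=rewrite | github.com/Meiko42/advent-of-code | 2020/Day12/day12.py | part2WaypointAdjust
-- ===== SOURCE A (Python) =====
-- def part2WaypointAdjust(y, x, adjustments):
--
--     xTemp = x
--     yTemp = y
--
--     while adjustments > 0:
--         xNew = 0 - yTemp
--         yNew = xTemp
--         adjustments -= 1
--         xTemp = xNew
--         yTemp = yNew
--
--     return xNew, yNew
-- ===== SOURCE B (Python) =====
-- def part2WaypointAdjust(y, x, adjustments):
--     # rotation (x,y) -> (-y,x) has period 4: apply it adjustments % 4 times via a table
--     k = adjustments % 4
--     if k == 0: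
--         return x, y
--     elif k == 1:
--         return -y, x
--     elif k == 2:
--         return -x, -y
--     else:
--         return y, -x
-- ===== Notes on version B (the rewrite author's own statement) =====
-- stated objective: faster
-- what changed: B replaces the O(adjustments) rotation loop by the closed-form period-4 rotation selected by adjustments % 4.
import Mathlib
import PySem

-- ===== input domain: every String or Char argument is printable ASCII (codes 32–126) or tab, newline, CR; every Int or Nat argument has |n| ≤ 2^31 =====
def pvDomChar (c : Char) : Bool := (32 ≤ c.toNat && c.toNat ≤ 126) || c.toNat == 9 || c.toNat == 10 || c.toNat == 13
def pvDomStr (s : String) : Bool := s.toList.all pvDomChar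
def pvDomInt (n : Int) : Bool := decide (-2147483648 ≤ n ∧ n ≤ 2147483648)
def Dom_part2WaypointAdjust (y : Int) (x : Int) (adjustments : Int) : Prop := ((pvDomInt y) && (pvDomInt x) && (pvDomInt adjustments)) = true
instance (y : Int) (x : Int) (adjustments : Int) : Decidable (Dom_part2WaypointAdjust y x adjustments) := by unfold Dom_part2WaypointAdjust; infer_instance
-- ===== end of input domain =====

-- B replaces A's O(adjustments) waypoint-rotation loop by the closed-form period-4 rotation (adjustments % 4): objective faster.


-- ===== PORT A =====
-- the while loop; acc holds the last (xNew, yNew) assigned (none = still unbound)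
def pvLoopA : Int → Int → Nat → Option (Int × Int) → Option (Int × Int)
  | _, _, 0, acc => acc
  | xT, yT, n + 1, _ => pvLoopA (0 - yT) xT n (some (0 - yT, xT))

def part2WaypointAdjust (y : Int) (x : Int) (adjustments : Int) : List Int :=
  match pvLoopA x y adjustments.toNat none with
  | some (xN, yN) => [xN, yN]
  | none => []    -- Python raises NameError here; excluded by Pre_

-- ===== PORT B =====
def part2WaypointAdjust_alt (y : Int) (x : Int) (adjustments : Int) : List Int :=
  let k := PySem.Int.mod adjustments 4
  if k = 0 then [x, y]
  else if k = 1 then [-y, x]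
  else if k = 2 then [-x, -y]
  else [y, -x]

-- ===== PRECONDITION & SPEC =====
-- Pre_ excludes adjustments ≤ 0, on which A's loop never runs and A raises NameError (xNew unbound).
def Pre_part2WaypointAdjust (y : Int) (x : Int) (adjustments : Int) : Prop := 1 ≤ adjustments
instance (y : Int) (x : Int) (adjustments : Int) : Decidable (Pre_part2WaypointAdjust y x adjustments) := by unfold Pre_part2WaypointAdjust; infer_instance
def pvWitness_part2WaypointAdjust : Int × Int × Int := (1, 2, 3)

def Spec_part2WaypointAdjust (y : Int) (x : Int) (adjustments : Int) (out : List Int) : Prop := out = part2WaypointAdjust_alt y x adjustments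
instance (y : Int) (x : Int) (adjustments : Int) (out : List Int) : Decidable (Spec_part2WaypointAdjust y x adjustments out) := by unfold Spec_part2WaypointAdjust; infer_instance

-- ===== CLAIM (what is proved, stated in full; the proofs are below) =====
def Claim_equal_part2WaypointAdjust : Prop := ∀ (y : Int) (x : Int) (adjustments : Int), Dom_part2WaypointAdjust y x adjustments → Pre_part2WaypointAdjust y x adjustments → Spec_part2WaypointAdjust y x adjustments (part2WaypointAdjust y x adjustments)

-- ===== LEMMAS AND PROOFS =====
theorem pvLoopA_period (xT yT : Int) (n : Nat) (a : Option (Int × Int)) :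
    pvLoopA xT yT (n + 5) a = pvLoopA xT yT (n + 1) a := by
  show pvLoopA xT yT (n + 4 + 1) a = pvLoopA xT yT (n + 1) a
  simp only [pvLoopA, zero_sub, neg_neg]

-- the result of rotating (x, y) by k quarter-turns (k the residue mod 4)
def pvPairK (k : Nat) (x y : Int) : Int × Int :=
  match k with
  | 0 => (x, y)
  | 1 => (-y, x)
  | 2 => (-x, -y)
  | _ => (y, -x)

theorem pvLoopA_rot (m : Nat) : ∀ (xT yT : Int) (a : Option (Int × Int)),
    pvLoopA xT yT (m + 1) a = some (pvPairK ((m + 1) % 4) xT yT) := by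
  induction m using Nat.strong_induction_on with
  | _ m ih =>
    intro xT yT a
    match m, ih with
    | 0, _ => norm_num [pvLoopA, pvPairK]
    | 1, _ => norm_num [pvLoopA, pvPairK]
    | 2, _ => norm_num [pvLoopA, pvPairK]
    | 3, _ => norm_num [pvLoopA, pvPairK]
    | (k + 4), ih =>
      have h5 : k + 4 + 1 = k + 5 := rfl
      rw [h5, pvLoopA_period, ih k (by omega)]
      have hmod : (k + 1) % 4 = (k + 4 + 1) % 4 := by omega
      rw [hmod]

-- ===== VERDICT (by name: the statement is the Claim_ definition above) =====
theorem part2WaypointAdjust_spec : Claim_equal_part2WaypointAdjust := by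
  intro y x a _ hpre
  unfold Spec_part2WaypointAdjust part2WaypointAdjust part2WaypointAdjust_alt
  unfold Pre_part2WaypointAdjust at hpre
  obtain ⟨m, hm⟩ : ∃ m, a.toNat = m + 1 := ⟨a.toNat - 1, by omega⟩
  have hk : PySem.Int.mod a 4 = (((m + 1) % 4 : Nat) : Int) := by
    rw [PySem.Int.mod_eq_emod_of_pos (by norm_num)]
    omega
  rw [hm, pvLoopA_rot, hk]
  have hlt : (m + 1) % 4 < 4 := Nat.mod_lt _ (by norm_num)
  set r := (m + 1) % 4 with hr
  interval_cases r <;> norm_num [pvPairK]
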